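-- pv_equiv track=rewrite | github.com/daveyboyc/cm-search | checker/utils.py | format_location_list
-- ===== SOURCE A (Python) =====
-- def normalize(text):
--     """Lowercase and remove all whitespace."""
--     if not isinstance(text, str):
--         return ""
--     return "".join(text.lower().split())
--
-- def format_location_list(locations, components):
--     """
--     Format a list of locations with their components.
--     Returns HTML string.
--     """
--     html = "<ul class='list-unstyled'>"
--
--     for location in sorted(locations):
--         # Add components at this location
--         location_components = [c for c in components if c.get("Location and Post Code", "") == location]
--
--         # Add debug info
--         component_count = len(location_components)
--
--         # Create component ID for first component (for linking)
--         component_id = ""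
--         if location_components and "CMU ID" in location_components[0]:
--             cmu_id = location_components[0].get("CMU ID", "")
--             if cmu_id:
--                 loc_normalized = normalize(location).replace("/", "_")
--                 component_id = f"{cmu_id}_{loc_normalized}"
--
--         # Format location as a blue link if we have a component ID
--         location_html = location
--         if component_id:
--             location_html = f'<a href="/component/{component_id}/" style="color: blue; text-decoration: underline;">{location}</a>'
--
--         html += f"""
--             <li class="mb-2">
--                 <strong>{location_html}</strong> <span class="text-muted">({component_count} components)</span>
--                 <ul class="ms-3">
--         """
--
--         # Add debug
--         if not location_components:
--             html += f"""
--                 <li><i>No components found for this location</i></li>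
--             """
--             continue
--
--         for component in location_components:
--             desc = component.get("Description of CMU Components", "N/A")
--             tech = component.get("Generating Technology Class", "")
--             auction = component.get("Auction Name", "")
--             delivery_year = component.get("Delivery Year", "")
--
--             # Get both types of IDs
--             system_id = component.get("_id", "")[:8] if component.get("_id") else ""
--             component_id_value = component.get("Component ID", "") if component.get("Component ID") else ""
--
--             # Extract auction year and type
--             auction_year = ""
--             auction_type = ""
--             if auction:
--                 # Parse auction info - example format: "T-4 2024/25"
--                 parts = auction.split()
--                 if len(parts) >= 1:
--                     auction_type = parts[0]  # T-1, T-4, etc.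
--                 if len(parts) >= 2:
--                     auction_year = parts[1]  # 2024/25, etc.
--
--             # Create badges
--             auction_badge = ""
--             if auction_type:
--                 badge_color = "info" if auction_type == "T-4" else "warning" if auction_type == "T-1" else "secondary"
--                 auction_badge = f'<span class="badge bg-{badge_color} ms-1">{auction_type}</span>'
--
--             year_info = f'<span class="text-muted ms-1">(Auction: {auction_year}, Delivery: {delivery_year})</span>' if auction_year else ""
--
--             # Add both IDs if available
--             id_info = ""
--             if system_id:
--                 id_info += f' <small class="text-muted">[ID: {system_id}]</small>'
--             if component_id_value:
--                 id_info += f' <small class="text-muted ms-1">[Component ID: {component_id_value}]</small>'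
--
--             # Now add the IDs to the component line - this was missing!
--             html += f"""
--                 <li><i>{desc}</i>{f" - {tech}" if tech else ""} {auction_badge} {year_info} {id_info}</li>
--             """
--
--         html += """
--                 </ul>
--             </li>
--         """
--
--     html += "</ul>"
--     return html
-- ===== SOURCE B (Python) =====
-- def format_location_list(locations, components):
--     """
--     Format a list of locations with their components.
--     Returns HTML string.
--     B: one-pass grouping of components into a dict keyed by location, then
--     each sorted location is rendered from its precomputed group as a flat
--     list of string fragments joined once at the end (O(C + L log L) instead
--     of rescanning every component for every location).
--     """
--     groups = {}
--     for c in components: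
--         groups.setdefault(c.get("Location and Post Code", ""), []).append(c)
--     out = ["<ul class='list-unstyled'>"]
--     for loc in sorted(locations):
--         out.extend(_location_fragments(loc, groups.get(loc, [])))
--     out.append("</ul>")
--     return "".join(out)
--
--
-- def _link_id(loc, comps):
--     if not comps:
--         return ""
--     head = comps[0]
--     if "CMU ID" not in head:
--         return ""
--     cmu = head.get("CMU ID", "")
--     if not cmu:
--         return ""
--     return cmu + "_" + "".join(loc.lower().split()).replace("/", "_")
--
--
-- def _location_fragments(loc, comps):
--     frags = ['\n            <li class="mb-2">\n                <strong>']
--     cid = _link_id(loc, comps)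
--     if cid:
--         frags.extend(['<a href="/component/', cid,
--                       '/" style="color: blue; text-decoration: underline;">', loc, '</a>'])
--     else:
--         frags.append(loc)
--     frags.extend(['</strong> <span class="text-muted">(', str(len(comps)),
--                   ' components)</span>\n                <ul class="ms-3">\n        '])
--     if not comps:
--         frags.append('\n                <li><i>No components found for this location</i></li>\n            ')
--         return frags
--     for c in comps:
--         frags.extend(_component_fragments(c))
--     frags.append('\n                </ul>\n            </li>\n        ')
--     return frags
--
--
-- def _component_fragments(c):
--     frags = ['\n                <li><i>', c.get("Description of CMU Components", "N/A"), '</i>']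
--     tech = c.get("Generating Technology Class", "")
--     if tech:
--         frags.extend([' - ', tech])
--     frags.append(' ')
--     words = c.get("Auction Name", "").split()
--     atype = words[0] if words else ""
--     ayear = words[1] if len(words) > 1 else ""
--     if atype:
--         color = {"T-4": "info", "T-1": "warning"}.get(atype, "secondary")
--         frags.extend(['<span class="badge bg-', color, ' ms-1">', atype, '</span>'])
--     frags.append(' ')
--     if ayear:
--         frags.extend(['<span class="text-muted ms-1">(Auction: ', ayear,
--                       ', Delivery: ', c.get("Delivery Year", ""), ')</span>'])
--     frags.append(' ')
--     sid = c.get("_id", "")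
--     if sid:
--         frags.extend([' <small class="text-muted">[ID: ', sid[:8], ']</small>'])
--     cval = c.get("Component ID", "")
--     if cval:
--         frags.extend([' <small class="text-muted ms-1">[Component ID: ', cval, ']</small>'])
--     frags.append('</li>\n            ')
--     return frags
-- ===== Notes on version B (the rewrite author's own statement) =====
-- stated objective: faster
-- what changed: B groups all components into a dict keyed by location in one pass and renders each sorted location from its precomputed group as a flat list of string fragments joined once at the end, instead of A's rescan of the whole component list for every location with incremental string concatenation.
import Mathlib
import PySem

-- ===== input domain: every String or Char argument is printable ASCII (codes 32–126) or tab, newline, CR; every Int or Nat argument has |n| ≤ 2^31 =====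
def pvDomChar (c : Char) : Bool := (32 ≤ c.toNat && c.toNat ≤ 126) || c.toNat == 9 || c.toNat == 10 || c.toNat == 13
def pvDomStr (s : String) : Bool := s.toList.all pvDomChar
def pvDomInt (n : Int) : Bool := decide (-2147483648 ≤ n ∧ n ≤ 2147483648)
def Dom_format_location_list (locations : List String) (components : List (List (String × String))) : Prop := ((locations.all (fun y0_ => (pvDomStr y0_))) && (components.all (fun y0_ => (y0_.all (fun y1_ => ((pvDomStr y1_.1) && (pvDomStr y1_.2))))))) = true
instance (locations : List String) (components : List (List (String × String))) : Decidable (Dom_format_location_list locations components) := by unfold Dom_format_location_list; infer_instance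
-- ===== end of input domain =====

-- B replaces A's per-location rescan of all components (O(L·C)) by a single grouping
-- pass into a dict keyed by location; each sorted location is then rendered from its
-- precomputed group as a flat list of string fragments joined once at the end.

-- ===== PORT A =====
-- normalize(text): the argument is always a str here, so only the str branch is ported
def pvNormalize (text : String) : String :=
  PySem.Str.join "" (PySem.Str.split₀ (PySem.Str.lower text))

-- the f-string A appends for one component (body of A's inner for-loop, named so the
-- proofs can refer to it; the code is the literal transliteration of that loop body)
def pvCompLineA (component : List (String × String)) : String :=
  let desc := (PySem.Dict.mk component).getD "Description of CMU Components" "N/A"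
  let tech := (PySem.Dict.mk component).getD "Generating Technology Class" ""
  let auction := (PySem.Dict.mk component).getD "Auction Name" ""
  let delivery_year := (PySem.Dict.mk component).getD "Delivery Year" ""
  let system_id :=
    if (PySem.Dict.mk component).getD "_id" "" = "" then ""
    else PySem.Str.slice ((PySem.Dict.mk component).getD "_id" "") none (some 8)
  let component_id_value :=
    if (PySem.Dict.mk component).getD "Component ID" "" = "" then ""
    else (PySem.Dict.mk component).getD "Component ID" ""
  let yt :=
    if auction = "" then ("", "")
    else
      let parts := PySem.Str.split₀ auction
      let auction_type := if 1 ≤ parts.length then parts.getD 0 "" else ""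
      let auction_year := if 2 ≤ parts.length then parts.getD 1 "" else ""
      (auction_year, auction_type)
  let auction_year := yt.1
  let auction_type := yt.2
  let auction_badge :=
    if auction_type = "" then ""
    else
      let badge_color := if auction_type = "T-4" then "info" else if auction_type = "T-1" then "warning" else "secondary"
      "<span class=\"badge bg-" ++ badge_color ++ " ms-1\">" ++ auction_type ++ "</span>"
  let year_info :=
    if auction_year = "" then ""
    else "<span class=\"text-muted ms-1\">(Auction: " ++ auction_year ++ ", Delivery: " ++ delivery_year ++ ")</span>"
  let id_info := ""
  let id_info := if system_id = "" then id_info else id_info ++ (" <small class=\"text-muted\">[ID: " ++ system_id ++ "]</small>")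
  let id_info := if component_id_value = "" then id_info else id_info ++ (" <small class=\"text-muted ms-1\">[Component ID: " ++ component_id_value ++ "]</small>")
  "\n                <li><i>" ++ desc ++ "</i>" ++ (if tech = "" then "" else " - " ++ tech) ++ " " ++ auction_badge ++ " " ++ year_info ++ " " ++ id_info ++ "</li>\n            "

-- body of A's outer for-loop (one location), named for the proofs
def pvLocBlockA (components : List (List (String × String))) (html : String) (location : String) : String :=
  let location_components := components.filter
    (fun c => (PySem.Dict.mk c).getD "Location and Post Code" "" == location)
  let component_count : Int := location_components.length
  let component_id :=
    match location_components with
    | [] => ""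
    | c0 :: _ =>
        if (PySem.Dict.mk c0).contains "CMU ID" then
          let cmu_id := (PySem.Dict.mk c0).getD "CMU ID" ""
          if cmu_id = "" then ""
          else
            let loc_normalized := PySem.Str.replace (pvNormalize location) "/" "_"
            cmu_id ++ "_" ++ loc_normalized
        else ""
  let location_html :=
    if component_id = "" then location
    else "<a href=\"/component/" ++ component_id ++ "/\" style=\"color: blue; text-decoration: underline;\">" ++ location ++ "</a>"
  let html := html ++ ("\n            <li class=\"mb-2\">\n                <strong>" ++ location_html ++ "</strong> <span class=\"text-muted\">(" ++ PySem.Int.toStr component_count ++ " components)</span>\n                <ul class=\"ms-3\">\n        ")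
  match location_components with
  | [] => html ++ "\n                <li><i>No components found for this location</i></li>\n            "
  | _ :: _ =>
    let html := location_components.foldl (fun html component => html ++ pvCompLineA component) html
    html ++ "\n                </ul>\n            </li>\n        "

def format_location_list (locations : List String) (components : List (List (String × String))) : String :=
  let html := "<ul class='list-unstyled'>"
  let html := (PySem.List.sorted locations (fun x => x) false).foldl (pvLocBlockA components) html
  html ++ "</ul>"

-- ===== PORT B =====
-- _link_id(loc, comps) of Source B (early returns become nested matches/ifs)
def pvLinkId (loc : String) (comps : List (List (String × String))) : String :=
  match comps with
  | [] => ""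
  | head :: _ =>
      if !(PySem.Dict.mk head).contains "CMU ID" then ""
      else
        let cmu := (PySem.Dict.mk head).getD "CMU ID" ""
        if cmu = "" then ""
        else cmu ++ "_" ++ PySem.Str.replace (PySem.Str.join "" (PySem.Str.split₀ (PySem.Str.lower loc))) "/" "_"

-- _component_fragments(c) of Source B: the flat fragment list for one component
def pvComponentFragments (c : List (String × String)) : List String :=
  let d := PySem.Dict.mk c
  let frags := ["\n                <li><i>", d.getD "Description of CMU Components" "N/A", "</i>"]
  let tech := d.getD "Generating Technology Class" ""
  let frags := frags ++ (if tech = "" then [] else [" - ", tech])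
  let frags := frags ++ [" "]
  let words := PySem.Str.split₀ (d.getD "Auction Name" "")
  let atype := match words with | [] => "" | w :: _ => w
  let ayear := match words with | _ :: y :: _ => y | _ => ""
  let frags := frags ++
    (if atype = "" then []
     else ["<span class=\"badge bg-",
           (PySem.Dict.mk [("T-4", "info"), ("T-1", "warning")]).getD atype "secondary",
           " ms-1\">", atype, "</span>"])
  let frags := frags ++ [" "]
  let frags := frags ++
    (if ayear = "" then []
     else ["<span class=\"text-muted ms-1\">(Auction: ", ayear,
           ", Delivery: ", d.getD "Delivery Year" "", ")</span>"])
  let frags := frags ++ [" "]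
  let sid := d.getD "_id" ""
  let frags := frags ++
    (if sid = "" then []
     else [" <small class=\"text-muted\">[ID: ", PySem.Str.slice sid none (some 8), "]</small>"])
  let cval := d.getD "Component ID" ""
  let frags := frags ++
    (if cval = "" then []
     else [" <small class=\"text-muted ms-1\">[Component ID: ", cval, "]</small>"])
  frags ++ ["</li>\n            "]

-- _location_fragments(loc, comps) of Source B
def pvLocationFragments (loc : String) (comps : List (List (String × String))) : List String :=
  let frags := ["\n            <li class=\"mb-2\">\n                <strong>"]
  let cid := pvLinkId loc comps
  let frags := frags ++
    (if cid = "" then [loc]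
     else ["<a href=\"/component/", cid, "/\" style=\"color: blue; text-decoration: underline;\">", loc, "</a>"])
  let frags := frags ++ ["</strong> <span class=\"text-muted\">(", PySem.Int.toStr (comps.length : Int), " components)</span>\n                <ul class=\"ms-3\">\n        "]
  match comps with
  | [] => frags ++ ["\n                <li><i>No components found for this location</i></li>\n            "]
  | _ :: _ =>
      (comps.foldl (fun fs c => fs ++ pvComponentFragments c) frags)
        ++ ["\n                </ul>\n            </li>\n        "]

def format_location_list_alt (locations : List String) (components : List (List (String × String))) : String :=
  let groups := components.foldl
    (fun g c => g.modify ((PySem.Dict.mk c).getD "Location and Post Code" "") [] (fun l => l ++ [c]))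
    PySem.Dict.empty
  let out := (PySem.List.sorted locations (fun x => x) false).foldl
    (fun acc loc => acc ++ pvLocationFragments loc (groups.getD loc [])) ["<ul class='list-unstyled'>"]
  PySem.Str.join "" (out ++ ["</ul>"])

-- ===== PRECONDITION & SPEC =====
def Spec_format_location_list (locations : List String) (components : List (List (String × String))) (out : String) : Prop := out = format_location_list_alt locations components
instance (locations : List String) (components : List (List (String × String))) (out : String) : Decidable (Spec_format_location_list locations components out) := by unfold Spec_format_location_list; infer_instance

-- ===== CLAIM (what is proved, stated in full; the proofs are below) =====
def Claim_equal_format_location_list : Prop := ∀ (locations : List String) (components : List (List (String × String))), Dom_format_location_list locations components → Spec_format_location_list locations components (format_location_list locations components)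

-- ===== LEMMAS AND PROOFS =====
theorem pv_join_empty_cons (x : String) (xs : List String) :
    PySem.Str.join "" (x :: xs) = x ++ PySem.Str.join "" xs := by
  cases xs with
  | nil =>
    show String.ofList ([].intercalate [x.toList]) = _
    simp [List.intercalate, PySem.Str.join, PySem.Chars.join]
  | cons y ys => simp [PySem.Str.join, PySem.Chars.join_cons_cons]

theorem pv_join_empty_nil : PySem.Str.join "" ([] : List String) = "" := by
  simp [PySem.Str.join, PySem.Chars.join, List.intercalate]

theorem pv_join_empty_append (xs ys : List String) :
    PySem.Str.join "" (xs ++ ys) = PySem.Str.join "" xs ++ PySem.Str.join "" ys := by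
  induction xs with
  | nil => simp [pv_join_empty_nil, String.empty_append]
  | cons x xs ih =>
    simp only [List.cons_append, pv_join_empty_cons, ih, String.append_assoc]

theorem pv_foldl_append_str {α : Type} (l : List α) (f : α → String) (a : String) :
    l.foldl (fun acc x => acc ++ f x) a = a ++ PySem.Str.join "" (l.map f) := by
  induction l generalizing a with
  | nil => simp [pv_join_empty_nil, String.append_empty]
  | cons x xs ih =>
    simp only [List.foldl_cons, List.map_cons]
    rw [ih, pv_join_empty_cons, ← String.append_assoc]

theorem pv_foldl_append_list {α β : Type} (l : List α) (f : α → List β) (a : List β) :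
    l.foldl (fun acc x => acc ++ f x) a = a ++ l.flatMap f := by
  induction l generalizing a with
  | nil => simp
  | cons x xs ih => simp [ih, List.append_assoc]

theorem pv_getD_group (cs : List (List (String × String)))
    (d : PySem.Dict String (List (List (String × String)))) (loc : String) :
    (cs.foldl (fun d c => d.modify ((PySem.Dict.mk c).getD "Location and Post Code" "") [] (fun l => l ++ [c])) d).getD loc []
      = d.getD loc [] ++ cs.filter (fun c => (PySem.Dict.mk c).getD "Location and Post Code" "" == loc) := by
  induction cs generalizing d with
  | nil => simp
  | cons c cs ih =>
    simp only [List.foldl_cons, List.filter_cons]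
    rw [ih, PySem.Dict.getD_modify]
    by_cases h : (PySem.Dict.mk c).getD "Location and Post Code" "" = loc
    · simp [h, List.append_assoc]
    · simp [h, Ne.symm h, beq_iff_eq]

-- the badge-colour table of B equals A's conditional chain
theorem pv_color_eq (t : String) :
    (PySem.Dict.mk [("T-4", "info"), ("T-1", "warning")]).getD t "secondary"
      = (if t = "T-4" then "info" else if t = "T-1" then "warning" else "secondary") := by
  by_cases h4 : t = "T-4"
  · subst h4; decide
  · by_cases h1 : t = "T-1"
    · subst h1; decide
    · simp only [PySem.Dict.getD, PySem.Dict.get?_mk_cons, beq_iff_eq,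
        if_neg (fun e : "T-4" = t => h4 e.symm), if_neg (fun e : "T-1" = t => h1 e.symm),
        if_neg h4, if_neg h1]
      rfl

theorem pv_split₀_empty : PySem.Str.split₀ "" = [] := by decide

theorem pv_slice8_ne_empty (s : String) (h : ¬(s = "")) :
    ¬(PySem.Str.slice s none (some 8) = "") := by
  intro hc
  apply h
  have h8 : ((8 : Int)) = ((8 : Nat) : Int) := by norm_num
  have htl : (PySem.Str.slice s none (some 8)).toList = s.toList.take 8 := by
    rw [PySem.Str.slice, h8]
    rw [show PySem.Chars.slice s.toList none (some ((8 : Nat) : Int)) = s.toList.take 8 from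
      PySem.List.slice_to_natCast s.toList 8]
    simp
  rw [hc] at htl
  apply String.toList_eq_nil_iff.mp
  cases hs : s.toList with
  | nil => rfl
  | cons a l => rw [hs] at htl; simp at htl

set_option maxRecDepth 8192 in
set_option maxHeartbeats 2000000 in
theorem pv_comp_eq (c : List (String × String)) :
    PySem.Str.join "" (pvComponentFragments c) = pvCompLineA c := by
  unfold pvComponentFragments pvCompLineA
  cases hw : PySem.Str.split₀ ((PySem.Dict.mk c).getD "Auction Name" "") with
  | nil =>
    by_cases ha : (PySem.Dict.mk c).getD "Auction Name" "" = "" <;>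
    by_cases ht : (PySem.Dict.mk c).getD "Generating Technology Class" "" = "" <;>
    by_cases hs : (PySem.Dict.mk c).getD "_id" "" = "" <;>
    by_cases hv : (PySem.Dict.mk c).getD "Component ID" "" = "" <;>
      simp [hw, ha, ht, hs, hv, pv_split₀_empty, pv_slice8_ne_empty, pv_join_empty_cons, pv_join_empty_nil, ← String.append_assoc] <;>
        (try (apply String.toList_inj.mp; simp [String.toList_append]))
  | cons w ws =>
    have ha : ¬((PySem.Dict.mk c).getD "Auction Name" "" = "") := by
      intro h; rw [h, pv_split₀_empty] at hw; exact List.cons_ne_nil _ _ hw.symm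
    cases ws with
    | nil =>
      by_cases hwe : w = "" <;>
      by_cases ht : (PySem.Dict.mk c).getD "Generating Technology Class" "" = "" <;>
      by_cases hs : (PySem.Dict.mk c).getD "_id" "" = "" <;>
      by_cases hv : (PySem.Dict.mk c).getD "Component ID" "" = "" <;>
        simp [hw, ha, hwe, ht, hs, hv, pv_color_eq, pv_slice8_ne_empty, pv_join_empty_cons, pv_join_empty_nil, ← String.append_assoc] <;>
        (try (apply String.toList_inj.mp; simp [String.toList_append]))
    | cons y ys =>
      by_cases hwe : w = "" <;>
      by_cases hye : y = "" <;>
      by_cases ht : (PySem.Dict.mk c).getD "Generating Technology Class" "" = "" <;>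
      by_cases hs : (PySem.Dict.mk c).getD "_id" "" = "" <;>
      by_cases hv : (PySem.Dict.mk c).getD "Component ID" "" = "" <;>
        simp [hw, ha, hwe, hye, ht, hs, hv, pv_color_eq, pv_slice8_ne_empty, pv_join_empty_cons, pv_join_empty_nil, ← String.append_assoc] <;>
        (try (apply String.toList_inj.mp; simp [String.toList_append]))

theorem pv_link_eq (loc : String) (comps : List (List (String × String))) :
    pvLinkId loc comps
      = (match comps with
         | [] => ""
         | c0 :: _ =>
             if (PySem.Dict.mk c0).contains "CMU ID" then
               if (PySem.Dict.mk c0).getD "CMU ID" "" = "" then ""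
               else (PySem.Dict.mk c0).getD "CMU ID" "" ++ "_" ++ PySem.Str.replace (pvNormalize loc) "/" "_"
             else "") := by
  unfold pvLinkId pvNormalize
  cases comps with
  | nil => rfl
  | cons c0 rest =>
    simp only [Bool.not_eq_true']
    by_cases h : (PySem.Dict.mk c0).contains "CMU ID" = true <;> simp [h]

theorem pv_join_flatMap (l : List (List (String × String))) :
    PySem.Str.join "" (l.flatMap pvComponentFragments) = PySem.Str.join "" (l.map pvCompLineA) := by
  induction l with
  | nil => simp [pv_join_empty_nil]
  | cons x xs ih =>
    simp only [List.flatMap_cons, List.map_cons, pv_join_empty_append, pv_join_empty_cons, ih,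
      pv_comp_eq]

theorem pv_linkfrag (cid loc : String) :
    PySem.Str.join "" (if cid = "" then [loc]
      else ["<a href=\"/component/", cid, "/\" style=\"color: blue; text-decoration: underline;\">", loc, "</a>"])
      = (if cid = "" then loc
         else "<a href=\"/component/" ++ cid ++ "/\" style=\"color: blue; text-decoration: underline;\">" ++ loc ++ "</a>") := by
  by_cases h : cid = "" <;>
    simp [h, pv_join_empty_cons, pv_join_empty_nil, String.append_assoc, String.append_empty]

theorem pv_loc_step (components : List (List (String × String))) (html location : String) :
    pvLocBlockA components html location
      = html ++ PySem.Str.join "" (pvLocationFragments location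
          (components.filter (fun c => (PySem.Dict.mk c).getD "Location and Post Code" "" == location))) := by
  unfold pvLocBlockA pvLocationFragments
  rw [pv_link_eq]
  cases hfl : components.filter (fun c => (PySem.Dict.mk c).getD "Location and Post Code" "" == location) with
  | nil =>
    simp only [pv_join_empty_append, pv_join_empty_cons, pv_join_empty_nil]
    simp [pv_join_empty_cons, pv_join_empty_nil, String.append_assoc, String.append_empty]
  | cons c0 rest =>
    dsimp only
    rw [pv_foldl_append_list, pv_foldl_append_str]
    simp only [pv_join_empty_append, pv_join_empty_cons, pv_join_empty_nil, pv_join_flatMap,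
      pv_linkfrag]
    simp only [String.append_assoc, String.append_empty]

-- ===== VERDICT (by name: the statement is the Claim_ definition above) =====
theorem format_location_list_spec : Claim_equal_format_location_list := by
  intro locations components _
  unfold Spec_format_location_list format_location_list format_location_list_alt
  dsimp only
  have hcong := PySem.List.foldl_congr_mem
      (PySem.List.sorted locations (fun x => x) false)
      (pvLocBlockA components)
      (fun (acc : String) (loc : String) =>
        acc ++ PySem.Str.join "" (pvLocationFragments loc
          (components.filter (fun c => (PySem.Dict.mk c).getD "Location and Post Code" "" == loc))))
      "<ul class='list-unstyled'>"
      (by intro acc loc _; exact pv_loc_step components acc loc)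
  rw [hcong, pv_foldl_append_str, pv_foldl_append_list]
  simp only [pv_getD_group, PySem.Dict.getD_empty, List.nil_append,
    pv_join_empty_append, pv_join_empty_cons, pv_join_empty_nil, String.append_empty,
    String.append_assoc]
  congr 1
  induction (PySem.List.sorted locations (fun x => x) false) with
  | nil => simp [pv_join_empty_nil, String.empty_append]
  | cons x xs ih =>
    simp only [List.map_cons, List.flatMap_cons, pv_join_empty_cons, pv_join_empty_append, ih,
      String.append_assoc]
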